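-- pv_equiv track=rewrite | github.com/PoisonDarterz/WIA1006_JC | pln.py | count_unique_points
-- ===== SOURCE A (Python) =====
-- def count_unique_points(n):
--     directions = [(1, 0), (-1, 0), (0, 1), (0, -1)]
--     positions = set([(0, 0)])
--     for i in range(n):
--         new_positions = set()
--         for pos in positions:
--             for d in directions:
--                 new_pos = (pos[0] + d[0], pos[1] + d[1])
--                 new_positions.add(new_pos)
--         positions = new_positions
--     return len(positions)
-- ===== SOURCE B (Python) =====
-- def count_unique_points(n):
--     # After k >= 0 steps the reachable set is the diamond {|x|+|y| <= k, x+y == k (mod 2)},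
--     # which has exactly (k+1)**2 points; range(n) runs 0 times for n <= 0.
--     m = n if n > 0 else 0
--     return (m + 1) ** 2
-- ===== Notes on version B (the rewrite author's own statement) =====
-- stated objective: faster
-- what changed: Replaces the frontier-set BFS simulation (n iterations, each rebuilding a set of O(n^2) points) with the closed form (max(n,0)+1)^2, the size of the parity-n diamond of reachable points.
import Mathlib
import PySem

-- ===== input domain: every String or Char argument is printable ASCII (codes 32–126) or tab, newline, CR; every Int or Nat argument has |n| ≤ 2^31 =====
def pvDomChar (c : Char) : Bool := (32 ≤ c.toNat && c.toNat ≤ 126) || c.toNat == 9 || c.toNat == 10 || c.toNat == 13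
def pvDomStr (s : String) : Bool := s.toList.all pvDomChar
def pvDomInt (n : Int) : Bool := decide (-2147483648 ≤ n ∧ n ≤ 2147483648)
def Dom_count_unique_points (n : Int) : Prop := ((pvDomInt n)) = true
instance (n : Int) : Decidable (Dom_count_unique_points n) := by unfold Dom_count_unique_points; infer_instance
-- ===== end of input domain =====

-- B replaces A's O(n^3) frontier-set simulation by the closed form (max(n,0)+1)^2.

-- ===== PORT A =====
-- Python's 'set' of points is ported as Std.HashSet (Int × Int): exact set semantics
-- (membership-guarded insert, size = number of distinct elements); the iteration order of
-- 'for pos in positions' is not modelled, but the new set built from it and the final 'len'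
-- are order-independent, so the port is exact.
-- one pass of 'for pos in positions: for d in directions: new_positions.add(pos+d)'
def cupStepH (directions : List (Int × Int)) (positions : Std.HashSet (Int × Int)) :
    Std.HashSet (Int × Int) :=
  positions.toList.foldl
    (fun newPositions pos =>
      directions.foldl
        (fun newPositions d => newPositions.insert (pos.1 + d.1, pos.2 + d.2))
        newPositions)
    (∅ : Std.HashSet (Int × Int))

def count_unique_points (n : Int) : Int :=
  let directions : List (Int × Int) := [(1, 0), (-1, 0), (0, 1), (0, -1)]
  let positions :=
    (PySem.List.pyRange 0 n 1).foldl
      (fun positions _ => cupStepH directions positions)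
      ((∅ : Std.HashSet (Int × Int)).insert (0, 0))
  (positions.size : Int)

-- ===== PORT B =====
def count_unique_points_alt (n : Int) : Int :=
  let m : Int := if n > 0 then n else 0
  (m + 1) ^ 2

-- ===== PRECONDITION & SPEC =====
def Spec_count_unique_points (n : Int) (out : Int) : Prop := out = count_unique_points_alt n
instance (n : Int) (out : Int) : Decidable (Spec_count_unique_points n out) := by unfold Spec_count_unique_points; infer_instance

-- ===== CLAIM (what is proved, stated in full; the proofs are below) =====
def Claim_equal_count_unique_points : Prop := ∀ (n : Int), Dom_count_unique_points n → Spec_count_unique_points n (count_unique_points n)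

-- ===== LEMMAS AND PROOFS =====

-- the four unit directions of A
def cupDirs : List (Int × Int) := [(1, 0), (-1, 0), (0, 1), (0, -1)]

-- the diamond: points at Manhattan distance ≤ k with the parity of k
def cupDiamond (k : Nat) (y : Int × Int) : Prop :=
  y.1.natAbs + y.2.natAbs ≤ k ∧ (y.1 + y.2 + k) % 2 = 0

-- list model of one step: fold PySem.Set.add over the same traversal
def cupStepL (S : List (Int × Int)) (acc : PySem.Set (Int × Int)) : PySem.Set (Int × Int) :=
  S.foldl
    (fun newPositions pos =>
      cupDirs.foldl
        (fun newPositions d => PySem.Set.add newPositions (pos.1 + d.1, pos.2 + d.2))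
        newPositions)
    acc

-- the hash set h and the nodup list ℓ represent the same finite set
def cupRel (h : Std.HashSet (Int × Int)) (ℓ : PySem.Set (Int × Int)) : Prop :=
  (∀ x, x ∈ h ↔ x ∈ ℓ) ∧ h.size = ℓ.length ∧ ℓ.Nodup

lemma cupRel_insert {h : Std.HashSet (Int × Int)} {ℓ : PySem.Set (Int × Int)}
    (hr : cupRel h ℓ) (x : Int × Int) : cupRel (h.insert x) (PySem.Set.add ℓ x) := by
  obtain ⟨hmem, hsz, hnd⟩ := hr
  refine ⟨?_, ?_, PySem.Set.nodup_add ℓ x hnd⟩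
  · intro y
    rw [Std.HashSet.mem_insert, PySem.Set.mem_add, hmem, beq_iff_eq]
    tauto
  · rw [Std.HashSet.size_insert, PySem.Set.add_eq_ite]
    by_cases hx : x ∈ ℓ
    · simp [hx, (hmem x).mpr hx, hsz]
    · have : x ∉ h := fun hh => hx ((hmem x).mp hh)
      simp [hx, this, hsz]

lemma cupRel_dirs {h : Std.HashSet (Int × Int)} {ℓ : PySem.Set (Int × Int)}
    (ds : List (Int × Int)) (pos : Int × Int) (hr : cupRel h ℓ) :
    cupRel (ds.foldl (fun newPositions d => newPositions.insert (pos.1 + d.1, pos.2 + d.2)) h)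
      (ds.foldl (fun newPositions d => PySem.Set.add newPositions (pos.1 + d.1, pos.2 + d.2)) ℓ) := by
  induction ds generalizing h ℓ with
  | nil => exact hr
  | cons d ds ih => exact ih (cupRel_insert hr _)

lemma cupRel_step {h : Std.HashSet (Int × Int)} {ℓ : PySem.Set (Int × Int)}
    (S : List (Int × Int)) (hr : cupRel h ℓ) :
    cupRel
      (S.foldl
        (fun newPositions pos =>
          cupDirs.foldl
            (fun newPositions d => newPositions.insert (pos.1 + d.1, pos.2 + d.2))
            newPositions)
        h)
      (cupStepL S ℓ) := by
  induction S generalizing h ℓ with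
  | nil => exact hr
  | cons p S ih => exact ih (cupRel_dirs cupDirs p hr)

lemma cupStepL_mem (S : List (Int × Int)) (acc : PySem.Set (Int × Int)) (y : Int × Int) :
    y ∈ cupStepL S acc ↔ y ∈ acc ∨ ∃ p ∈ S, ∃ d ∈ cupDirs, y = (p.1 + d.1, p.2 + d.2) := by
  induction S generalizing acc with
  | nil => simp [cupStepL]
  | cons p S ih =>
    rw [cupStepL, List.foldl_cons]
    rw [show (cupDirs.foldl
        (fun newPositions d => PySem.Set.add newPositions (p.1 + d.1, p.2 + d.2)) acc) =
        cupDirs.foldl (fun s d => PySem.Set.add s ((fun d => (p.1 + d.1, p.2 + d.2)) d)) acc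
      from rfl]
    rw [show (S.foldl
        (fun newPositions pos =>
          cupDirs.foldl
            (fun newPositions d => PySem.Set.add newPositions (pos.1 + d.1, pos.2 + d.2))
            newPositions)
        (cupDirs.foldl (fun s d => PySem.Set.add s ((fun d => (p.1 + d.1, p.2 + d.2)) d)) acc)) =
        cupStepL S (cupDirs.foldl (fun s d => PySem.Set.add s ((fun d => (p.1 + d.1, p.2 + d.2)) d)) acc)
      from rfl]
    rw [ih, PySem.Set.mem_foldl_add]
    constructor
    · rintro (⟨hacc | ⟨d, hd, rfl⟩⟩ | ⟨q, hq, d, hd, rfl⟩)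
      · exact .inl hacc
      · exact .inr ⟨p, by simp, d, hd, rfl⟩
      · exact .inr ⟨q, by simp [hq], d, hd, rfl⟩
    · rintro (hacc | ⟨q, hq, d, hd, rfl⟩)
      · exact .inl (.inl hacc)
      · rcases List.mem_cons.mp hq with rfl | hq
        · exact .inl (.inr ⟨d, hd, rfl⟩)
        · exact .inr ⟨q, hq, d, hd, rfl⟩

-- one step turns the k-diamond into the (k+1)-diamond
lemma cupDiamond_step (k : Nat) (y : Int × Int) :
    (∃ p, cupDiamond k p ∧ ∃ d ∈ cupDirs, y = (p.1 + d.1, p.2 + d.2)) ↔ cupDiamond (k + 1) y := by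
  constructor
  · rintro ⟨p, ⟨h1, h2⟩, d, hd, rfl⟩
    fin_cases hd <;> constructor <;> simp <;> omega
  · rintro ⟨h1, h2⟩
    obtain ⟨x, z⟩ := y
    simp only at h1 h2
    rcases lt_trichotomy x 0 with hx | rfl | hx
    · exact ⟨(x + 1, z), ⟨by simp; omega, by simp; omega⟩, (-1, 0), by simp [cupDirs], by simp⟩
    · rcases lt_trichotomy z 0 with hz | rfl | hz
      · exact ⟨(0, z + 1), ⟨by simp; omega, by simp; omega⟩, (0, -1), by simp [cupDirs], by simp⟩
      · -- origin with k+1 even, so k ≥ 1 and (1,0) is in the k-diamond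
        exact ⟨(1, 0), ⟨by simp; omega, by simp; omega⟩, (-1, 0), by simp [cupDirs], by simp⟩
      · exact ⟨(0, z - 1), ⟨by simp; omega, by simp; omega⟩, (0, 1), by simp [cupDirs], by simp⟩
    · exact ⟨(x - 1, z), ⟨by simp; omega, by simp; omega⟩, (1, 0), by simp [cupDirs], by simp⟩

-- a canonical enumeration of the diamond, via the grid bijection (a,b) ↦ (a-b, a+b-k)
def cupGrid (k : Nat) : List (Int × Int) :=
  ((List.range (k + 1)) ×ˢ (List.range (k + 1))).map
    (fun p => ((p.1 : Int) - (p.2 : Int), (p.1 : Int) + (p.2 : Int) - (k : Int)))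

lemma cupGrid_length (k : Nat) : (cupGrid k).length = (k + 1) * (k + 1) := by
  simp [cupGrid, List.length_product]

lemma cupGrid_mem (k : Nat) (y : Int × Int) : y ∈ cupGrid k ↔ cupDiamond k y := by
  obtain ⟨x, z⟩ := y
  simp only [cupGrid, List.mem_map, Prod.exists, List.mem_product, List.mem_range, cupDiamond]
  constructor
  · rintro ⟨a, b, ⟨ha, hb⟩, h⟩
    rw [Prod.mk.injEq] at h
    obtain ⟨rfl, rfl⟩ := h
    constructor <;> omega
  · rintro ⟨h1, h2⟩
    refine ⟨((x + z + k) / 2).toNat, ((z - x + k) / 2).toNat, ⟨by omega, by omega⟩, ?_⟩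
    rw [Prod.mk.injEq]
    constructor <;> omega

lemma cupGrid_nodup (k : Nat) : (cupGrid k).Nodup := by
  refine List.Nodup.map ?_ (List.Nodup.product List.nodup_range List.nodup_range)
  rintro ⟨a, b⟩ ⟨a', b'⟩ h
  rw [Prod.mk.injEq] at h ⊢
  obtain ⟨h1, h2⟩ := h
  constructor <;> omega

-- any nodup list whose members are exactly the k-diamond has (k+1)^2 elements
lemma cupDiamond_length (k : Nat) (ℓ : List (Int × Int)) (hnd : ℓ.Nodup)
    (hmem : ∀ y, y ∈ ℓ ↔ cupDiamond k y) : ℓ.length = (k + 1) * (k + 1) := by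
  have hperm : ℓ.Perm (cupGrid k) :=
    (List.perm_ext_iff_of_nodup hnd (cupGrid_nodup k)).mpr
      (fun y => (hmem y).trans (cupGrid_mem k y).symm)
  rw [hperm.length_eq, cupGrid_length]

-- the loop invariant: after k steps the hash set holds exactly the k-diamond
def cupGood (k : Nat) (h : Std.HashSet (Int × Int)) : Prop :=
  (∀ x, x ∈ h ↔ cupDiamond k x) ∧ h.size = (k + 1) * (k + 1)

lemma cupGood_step {k : Nat} {h : Std.HashSet (Int × Int)} (hg : cupGood k h) :
    cupGood (k + 1) (cupStepH cupDirs h) := by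
  obtain ⟨hmem, hsz⟩ := hg
  have hrel : cupRel (cupStepH cupDirs h) (cupStepL h.toList PySem.Set.empty) :=
    cupRel_step h.toList ⟨by simp [PySem.Set.empty], by simp [PySem.Set.empty], by simp [PySem.Set.empty]⟩
  obtain ⟨hm, hs, hn⟩ := hrel
  have hLmem : ∀ y, y ∈ cupStepL h.toList PySem.Set.empty ↔ cupDiamond (k + 1) y := by
    intro y
    rw [cupStepL_mem, ← cupDiamond_step k y]
    simp only [PySem.Set.empty]
    constructor
    · rintro (h0 | ⟨p, hp, d, hd, rfl⟩)
      · cases h0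
      · exact ⟨p, (hmem p).mp (Std.HashSet.mem_toList.mp hp), d, hd, rfl⟩
    · rintro ⟨p, hp, d, hd, rfl⟩
      exact .inr ⟨p, Std.HashSet.mem_toList.mpr ((hmem p).mpr hp), d, hd, rfl⟩
  refine ⟨fun x => (hm x).trans (hLmem x), ?_⟩
  rw [hs, cupDiamond_length (k + 1) _ hn hLmem]

-- the initial set {(0,0)} is the 0-diamond
lemma cupGood_zero : cupGood 0 ((∅ : Std.HashSet (Int × Int)).insert (0, 0)) := by
  constructor
  · intro x
    rw [Std.HashSet.mem_insert]
    simp only [Std.HashSet.not_mem_empty, or_false, beq_iff_eq, cupDiamond]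
    obtain ⟨a, b⟩ := x
    constructor
    · intro h0
      rw [Prod.mk.injEq] at h0
      obtain ⟨ha, hb⟩ := h0
      subst ha
      subst hb
      simp
    · rintro ⟨h1, h2⟩
      simp only [Prod.mk.injEq]
      simp at h1
      constructor <;> omega
  · rw [Std.HashSet.size_insert]
    simp

lemma cupGood_iter (k : Nat) :
    cupGood k (Nat.rec ((∅ : Std.HashSet (Int × Int)).insert (0, 0))
      (fun _ h => cupStepH cupDirs h) k) := by
  induction k with
  | zero => exact cupGood_zero
  | succ k ih => exact cupGood_step ih

lemma cupFold_eq_iter (l : List Int) (s : Std.HashSet (Int × Int)) :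
    l.foldl (fun positions _ => cupStepH cupDirs positions) s =
      Nat.rec s (fun _ t => cupStepH cupDirs t) l.length := by
  induction l generalizing s with
  | nil => rfl
  | cons a l ih =>
    rw [List.foldl_cons, ih]
    clear ih
    induction l with
    | nil => rfl
    | cons b l ih => exact congrArg (cupStepH cupDirs) ih

-- ===== VERDICT (by name: the statement is the Claim_ definition above) =====
theorem count_unique_points_spec : Claim_equal_count_unique_points := by
  intro n _
  show count_unique_points n = count_unique_points_alt n
  have hA : count_unique_points n =
      (((PySem.List.pyRange 0 n 1).foldl
        (fun positions _ => cupStepH cupDirs positions)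
        ((∅ : Std.HashSet (Int × Int)).insert (0, 0))).size : Int) := rfl
  rw [hA, cupFold_eq_iter, PySem.List.length_pyRange_one]
  rw [(cupGood_iter (n - 0).toNat).2]
  show (((((n - 0).toNat + 1) * ((n - 0).toNat + 1) : Nat) : Int)) = count_unique_points_alt n
  unfold count_unique_points_alt
  have hm : (((n - 0).toNat : Int)) = (if n > 0 then n else 0) := by split_ifs <;> omega
  push_cast
  rw [hm, pow_two]
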